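-- pv_equiv track=rewrite | github.com/pctablet505/HackerRank | Hack the Interview II - Global/Minimum String Co-Efficient .py | minimise
-- ===== SOURCE A (Python) =====
-- def minimise(arr,p):
--     if p==0:
--         return sum(arr)
--     n=len(arr)
--     if n<2*p:
--         return 0
--     s=sum(arr[2*p:])
--     variations=[s]
--     for i in range(2*p):
--         ns=variations[-1]+arr[2*p-1-i]-arr[-i-1]
--         variations.append(ns)
--
--     return min(variations)
-- ===== SOURCE B (Python) =====
-- def minimise(arr, p):
--     if p == 0:
--         return sum(arr)
--     n = len(arr)
--     if n < 2 * p: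
--         return 0
--     pre = [0]
--     for x in arr:
--         pre.append(pre[-1] + x)
--     return min(pre[n - j] - pre[2 * p - j] for j in range(2 * p + 1))
-- ===== Notes on version B (the rewrite author's own statement) =====
-- stated objective: alternative
-- what changed: Replaces the incremental sliding-window loop (running sum updated by adding/subtracting boundary elements into a growing variations list) with a precomputed prefix-sum table and a single min over prefix differences pre[n-j]-pre[2p-j].
-- outside the precondition, e.g. on minimise([1, 2, 3], -1): A returns 5, B raises ValueError
import Mathlib
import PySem

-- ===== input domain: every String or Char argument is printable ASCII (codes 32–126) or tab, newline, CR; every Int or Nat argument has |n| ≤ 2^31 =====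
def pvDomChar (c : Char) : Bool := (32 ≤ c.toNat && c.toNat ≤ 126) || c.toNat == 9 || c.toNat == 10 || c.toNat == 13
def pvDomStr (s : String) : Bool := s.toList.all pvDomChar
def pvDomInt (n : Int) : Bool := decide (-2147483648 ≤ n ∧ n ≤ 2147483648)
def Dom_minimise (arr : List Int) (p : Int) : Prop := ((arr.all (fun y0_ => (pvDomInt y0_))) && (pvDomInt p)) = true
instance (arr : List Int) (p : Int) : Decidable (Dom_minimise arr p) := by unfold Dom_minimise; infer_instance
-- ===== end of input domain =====

-- B replaces A's incremental sliding-window loop by a prefix-sum table and a min over table differences (return value only; no mutation).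


-- ===== PORT A =====
-- the body of A's for-loop: ns = variations[-1] + arr[2*p-1-i] - arr[-i-1]; variations.append(ns)
def minimiseStep (arr : List Int) (p : Int) (vs : List Int) (i : Int) : List Int :=
  vs ++ [PySem.List.pyGetD vs (-1) 0 + PySem.List.pyGetD arr (2*p - 1 - i) 0 - PySem.List.pyGetD arr (-i - 1) 0]

def minimise (arr : List Int) (p : Int) : Int :=
  if p == 0 then arr.sum
  else
    let n : Int := arr.length
    if n < 2*p then 0
    else
      let s := (PySem.List.slice arr (some (2*p)) none).sum
      let variations := (PySem.List.pyRange 0 (2*p) 1).foldl (minimiseStep arr p) [s]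
      (PySem.List.min? variations (fun x => x)).getD 0

-- ===== PORT B =====
-- the body of B's prefix loop: pre.append(pre[-1] + x)
def preStep (ps : List Int) (x : Int) : List Int :=
  ps ++ [PySem.List.pyGetD ps (-1) 0 + x]

def minimise_alt (arr : List Int) (p : Int) : Int :=
  if p == 0 then arr.sum
  else
    let n : Int := arr.length
    if n < 2*p then 0
    else
      let pre := arr.foldl preStep [(0 : Int)]
      (PySem.List.min? ((PySem.List.pyRange 0 (2*p + 1) 1).map
          (fun j => PySem.List.pyGetD pre (n - j) 0 - PySem.List.pyGetD pre (2*p - j) 0)) (fun x => x)).getD 0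

-- ===== PRECONDITION & SPEC =====
-- Pre_ excludes negative p, outside the task's natural domain (p is a count): there A's negative slice/index
-- wraparound accidentally returns the sum of a tail of arr, while B's min over an empty range raises ValueError.
def Pre_minimise (arr : List Int) (p : Int) : Prop := 0 ≤ p
instance (arr : List Int) (p : Int) : Decidable (Pre_minimise arr p) := by unfold Pre_minimise; infer_instance
def pvWitness_minimise : List Int × Int := ([1, 2, 3], 1)

def Spec_minimise (arr : List Int) (p : Int) (out : Int) : Prop := out = minimise_alt arr p
instance (arr : List Int) (p : Int) (out : Int) : Decidable (Spec_minimise arr p out) := by unfold Spec_minimise; infer_instance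

-- ===== CLAIM (what is proved, stated in full; the proofs are below) =====
def Claim_equal_minimise : Prop := ∀ (arr : List Int) (p : Int), Dom_minimise arr p → Pre_minimise arr p → Spec_minimise arr p (minimise arr p)

-- ===== LEMMAS AND PROOFS =====

-- prefix sum of the first k elements
def pvS (arr : List Int) (k : Nat) : Int := (arr.take k).sum
-- the j-th window value: sum(arr[2p-j : n-j]) as a difference of prefix sums
def pvW (arr : List Int) (P : Nat) (j : Nat) : Int := pvS arr (arr.length - j) - pvS arr (P - j)
-- running partial sums appended by B's loop
def pvTail (c : Int) : List Int → List Int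
  | [] => []
  | x :: xs => (c + x) :: pvTail (c + x) xs

theorem pvS_succ (arr : List Int) (m : Nat) (h : m < arr.length) :
    pvS arr (m + 1) = pvS arr m + arr[m] := by
  simp [pvS, List.sum_take_succ _ _ h]

theorem foldl_preStep (xs : List Int) (ps : List Int) (c : Int)
    (h : PySem.List.pyGetD ps (-1) 0 = c) (hne : ps ≠ []) :
    xs.foldl preStep ps = ps ++ pvTail c xs := by
  induction xs generalizing ps c with
  | nil => simp [pvTail]
  | cons x xs ih =>
      simp only [List.foldl_cons, pvTail]
      rw [show preStep ps x = ps ++ [c + x] by simp [preStep, h]]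
      rw [ih (ps ++ [c + x]) (c + x) (by simp [PySem.List.pyGetD_neg_one_append_singleton]) (by simp)]
      simp

theorem pvTail_eq (xs : List Int) (c : Int) :
    c :: pvTail c xs = (List.range (xs.length + 1)).map (fun k => c + pvS xs k) := by
  induction xs generalizing c with
  | nil => simp [pvTail, pvS]
  | cons x xs ih =>
      simp only [pvTail, List.length_cons]
      rw [List.range_succ_eq_map]
      simp only [List.map_cons, List.map_map]
      congr 1
      · simp [pvS]
      · rw [ih (c + x)]
        apply List.map_congr_left
        intro k _
        simp [pvS, List.take_succ_cons, add_assoc]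

theorem pre_eq (arr : List Int) :
    arr.foldl preStep [(0 : Int)] = (List.range (arr.length + 1)).map (pvS arr) := by
  rw [foldl_preStep arr [(0 : Int)] 0
    (by show PySem.List.pyGetD ([] ++ [(0 : Int)]) (-1) 0 = 0
        rw [PySem.List.pyGetD_neg_one_append_singleton]) (by simp)]
  have := pvTail_eq arr 0
  simp only [zero_add] at this
  simpa using this

theorem pvW_succ (arr : List Int) (P k : Nat) (hk : k < P) (hP : P ≤ arr.length) :
    pvW arr P (k + 1) = pvW arr P k + arr[P - 1 - k]'(by omega) - arr[arr.length - 1 - k]'(by omega) := by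
  have h1 : arr.length - k = (arr.length - (k + 1)) + 1 := by omega
  have h2 : P - k = (P - (k + 1)) + 1 := by omega
  have e1 := pvS_succ arr (arr.length - (k + 1)) (by omega)
  have e2 := pvS_succ arr (P - (k + 1)) (by omega)
  simp only [pvW, h1, h2, e1, e2]
  have g1 : arr.length - (k + 1) = arr.length - 1 - k := by omega
  have g2 : P - (k + 1) = P - 1 - k := by omega
  simp only [g1, g2]
  ring

theorem foldA_eq (arr : List Int) (p : Int) (hp : 0 < p) (hn : 2*p ≤ (arr.length : Int))
    (k : Nat) (hk : (k : Int) ≤ 2*p) :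
    (PySem.List.pyRange 0 k 1).foldl (minimiseStep arr p) [pvW arr (2*p).toNat 0] =
      (List.range (k + 1)).map (pvW arr (2*p).toNat) := by
  induction k with
  | zero => simp [PySem.List.pyRange_one_eq_nil, List.range_succ]
  | succ k ih =>
      have hk' : (k : Int) ≤ 2*p := by push_cast at hk ⊢; omega
      have hrange : PySem.List.pyRange 0 ((k : Int) + 1) 1 =
          PySem.List.pyRange 0 k 1 ++ [(k : Int)] :=
        PySem.List.pyRange_one_succ_right (by positivity)
      have hcast : ((k + 1 : Nat) : Int) = (k : Int) + 1 := by push_cast; ring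
      rw [hcast, hrange, List.foldl_append, ih hk', List.foldl_cons, List.foldl_nil]
      set P := (2*p).toNat with hPdef
      have hPn : P ≤ arr.length := by omega
      have hkP : k < P := by omega
      unfold minimiseStep
      rw [show List.range (k + 1 + 1) = List.range (k + 1) ++ [k + 1] from List.range_succ,
          List.map_append]
      congr 1
      rw [show List.range (k + 1) = List.range k ++ [k] from List.range_succ,
          List.map_append]
      simp only [List.map_cons, List.map_nil]
      rw [PySem.List.pyGetD_neg_one_append_singleton]
      congr 1
      have hidx1 : 2*p - 1 - (k : Int) = ((P - 1 - k : Nat) : Int) := by push_cast; omega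
      have hidx2 : -(k : Int) - 1 = -(((k + 1 : Nat) : Int)) := by push_cast; ring
      rw [hidx1, PySem.List.pyGetD_natCast, hidx2,
          PySem.List.pyGetD_neg_natCast _ _ _ (by omega) (by omega)]
      rw [List.getD_eq_getElem _ _ (by omega)]
      have := pvW_succ arr P k hkP hPn
      rw [this]
      congr 2
      omega

theorem s_eq (arr : List Int) (p : Int) (hp : 0 ≤ p) (hn : 2*p ≤ (arr.length : Int)) :
    (PySem.List.slice arr (some (2*p)) none).sum = pvW arr (2*p).toNat 0 := by
  rw [PySem.List.slice_from _ (by omega)]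
  have h : (arr.take (2*p).toNat).sum + (arr.drop (2*p).toNat).sum = arr.sum :=
    List.sum_take_add_sum_drop arr _
  have hlen : arr.take arr.length = arr := List.take_length
  simp only [pvW, pvS, Nat.sub_zero, hlen]
  omega

theorem alt_list_eq (arr : List Int) (p : Int) (hp : 0 < p) (hn : 2*p ≤ (arr.length : Int)) :
    (PySem.List.pyRange 0 (2*p + 1) 1).map
        (fun j => PySem.List.pyGetD (arr.foldl preStep [(0 : Int)]) ((arr.length : Int) - j) 0 -
                  PySem.List.pyGetD (arr.foldl preStep [(0 : Int)]) (2*p - j) 0) =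
      (List.range ((2*p).toNat + 1)).map (pvW arr (2*p).toNat) := by
  rw [pre_eq, PySem.List.pyRange_one]
  rw [List.map_map]
  have hcnt : ((2*p + 1 - 0).toNat) = (2*p).toNat + 1 := by omega
  rw [hcnt]
  apply List.map_congr_left
  intro k hk
  rw [List.mem_range] at hk
  simp only [Function.comp]
  have hj1 : (arr.length : Int) - (0 + (k : Int)) = (((arr.length - k : Nat)) : Int) := by
    push_cast; omega
  have hj2 : 2*p - (0 + (k : Int)) = (((2*p).toNat - k : Nat) : Int) := by push_cast; omega
  rw [hj1, hj2, PySem.List.pyGetD_natCast, PySem.List.pyGetD_natCast]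
  rw [List.getD_eq_getElem _ _ (by simp only [List.length_map, List.length_range]; omega),
      List.getD_eq_getElem _ _ (by simp only [List.length_map, List.length_range]; omega)]
  simp only [List.getElem_map, List.getElem_range]
  rfl

-- ===== VERDICT (by name: the statement is the Claim_ definition above) =====
theorem minimise_spec : Claim_equal_minimise := by
  intro arr p _ hpre
  unfold Spec_minimise minimise minimise_alt
  by_cases hz : p = 0
  · simp [hz]
  · have hp : 0 < p := lt_of_le_of_ne hpre (Ne.symm hz)
    simp only [beq_iff_eq, hz, if_false]
    by_cases hlt : (arr.length : Int) < 2*p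
    · simp [hlt]
    · have hn : 2*p ≤ (arr.length : Int) := by omega
      simp only [hlt, if_false]
      rw [s_eq arr p (le_of_lt hp) hn]
      have hfold := foldA_eq arr p hp hn (2*p).toNat (by omega)
      have hcast : (((2*p).toNat : Nat) : Int) = 2*p := by omega
      rw [hcast] at hfold
      rw [hfold, alt_list_eq arr p hp hn]
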